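-- pv_equiv track=rewrite | github.com/wojohowitz00/second-brain | backend/_scripts/message_classifier.py | _validate_domain
-- ===== SOURCE A (Python) =====
-- from typing import Dict, List, Optional
--
-- DEFAULT_DOMAIN = "Personal"
--
-- def _validate_domain(domain: str, valid_domains: List[str]) -> str:
--     """Validate domain against vocabulary."""
--     if not domain:
--         return DEFAULT_DOMAIN
--
--     # Case-insensitive match
--     domain_lower = domain.lower()
--     for valid in valid_domains:
--         if valid.lower() == domain_lower:
--             return valid
--
--     # Check for partial match
--     for valid in valid_domains:
--         if domain_lower in valid.lower() or valid.lower() in domain_lower: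
--             return valid
--
--     return DEFAULT_DOMAIN
-- ===== SOURCE B (Python) =====
-- DEFAULT_DOMAIN = "Personal"
--
-- def _validate_domain(domain, valid_domains):
--     """Single pass: return first exact match immediately; remember the first
--     partial match as a fallback."""
--     if not domain:
--         return DEFAULT_DOMAIN
--     domain_lower = domain.lower()
--     partial = None
--     for valid in valid_domains:
--         valid_lower = valid.lower()
--         if valid_lower == domain_lower:
--             return valid
--         if partial is None and (domain_lower in valid_lower or valid_lower in domain_lower):
--             partial = valid
--     return partial if partial is not None else DEFAULT_DOMAIN
-- ===== Notes on version B (the rewrite author's own statement) =====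
-- stated objective: alternative
-- what changed: Replaces A's two separate scans (exact pass, then partial pass) with a single traversal that returns an exact match immediately and keeps the first partial match as a fallback accumulator.
import Mathlib
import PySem

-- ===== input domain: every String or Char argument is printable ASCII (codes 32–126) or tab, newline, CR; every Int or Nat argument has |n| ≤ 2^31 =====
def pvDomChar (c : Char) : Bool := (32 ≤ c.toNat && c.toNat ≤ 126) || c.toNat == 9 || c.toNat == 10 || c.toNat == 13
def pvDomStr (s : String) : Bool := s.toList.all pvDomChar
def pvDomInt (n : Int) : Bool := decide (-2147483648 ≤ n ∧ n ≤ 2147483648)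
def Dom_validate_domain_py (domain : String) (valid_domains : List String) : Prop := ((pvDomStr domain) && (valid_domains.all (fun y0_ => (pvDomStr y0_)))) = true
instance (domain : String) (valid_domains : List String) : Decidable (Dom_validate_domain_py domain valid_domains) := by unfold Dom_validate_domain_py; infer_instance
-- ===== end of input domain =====

-- B merges A's two scans (exact pass, then partial pass) into one traversal
-- that returns an exact match immediately and keeps the first partial match
-- as a fallback accumulator; same return value everywhere.

-- ===== PORT A =====

-- first loop of A: first case-insensitive exact match
def pvExactScan (dl : String) : List String → Option String
  | [] => none
  | v :: rest => if PySem.Str.lower v = dl then some v else pvExactScan dl rest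

-- second loop of A: first partial (substring either way) match
def pvPartialScan (dl : String) : List String → Option String
  | [] => none
  | v :: rest =>
    if PySem.Str.isIn dl (PySem.Str.lower v) || PySem.Str.isIn (PySem.Str.lower v) dl then
      some v
    else pvPartialScan dl rest

def validate_domain_py (domain : String) (valid_domains : List String) : String :=
  if domain = "" then "Personal"
  else
    let dl := PySem.Str.lower domain
    match pvExactScan dl valid_domains with
    | some v => v
    | none =>
      match pvPartialScan dl valid_domains with
      | some v => v
      | none => "Personal"

-- ===== PORT B =====

-- B's single pass: immediate return on exact match, first partial kept in the accumulator
def pvAltLoop (dl : String) (partialM : Option String) : List String → String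
  | [] => partialM.getD "Personal"
  | v :: rest =>
    let vl := PySem.Str.lower v
    if vl = dl then v
    else if partialM.isNone && (PySem.Str.isIn dl vl || PySem.Str.isIn vl dl) then
      pvAltLoop dl (some v) rest
    else
      pvAltLoop dl partialM rest

def validate_domain_py_alt (domain : String) (valid_domains : List String) : String :=
  if domain = "" then "Personal"
  else pvAltLoop (PySem.Str.lower domain) none valid_domains

-- ===== PRECONDITION & SPEC =====

def Spec_validate_domain_py (domain : String) (valid_domains : List String) (out : String) : Prop :=
  out = validate_domain_py_alt domain valid_domains
instance (domain : String) (valid_domains : List String) (out : String) :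
    Decidable (Spec_validate_domain_py domain valid_domains out) := by
  unfold Spec_validate_domain_py; infer_instance

-- ===== CLAIM =====

def Claim_equal_validate_domain_py : Prop :=
  ∀ (domain : String) (valid_domains : List String),
    Dom_validate_domain_py domain valid_domains →
      Spec_validate_domain_py domain valid_domains (validate_domain_py domain valid_domains)

-- ===== LEMMAS AND PROOFS =====

-- once a partial fallback is stored, B's loop returns the first exact match if any, else the fallback
theorem pvAltLoop_some (dl w : String) (xs : List String) :
    pvAltLoop dl (some w) xs =
      (match pvExactScan dl xs with
       | some v => v
       | none => w) := by
  induction xs with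
  | nil => rfl
  | cons v rest ih =>
    simp only [pvAltLoop, pvExactScan, Option.isNone_some, Bool.false_and, if_false]
    split <;> simp [ih]

-- with no fallback stored, B's loop computes exactly A's two-scan result
theorem pvAltLoop_none (dl : String) (xs : List String) :
    pvAltLoop dl none xs =
      (match pvExactScan dl xs with
       | some v => v
       | none =>
         match pvPartialScan dl xs with
         | some v => v
         | none => "Personal") := by
  induction xs with
  | nil => rfl
  | cons v rest ih =>
    simp only [pvAltLoop, pvExactScan, pvPartialScan, Option.isNone_none, Bool.true_and]
    by_cases hx : PySem.Str.lower v = dl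
    · simp [hx]
    · simp only [hx, if_false]
      by_cases hp : (PySem.Str.isIn dl (PySem.Str.lower v) ||
                     PySem.Str.isIn (PySem.Str.lower v) dl) = true
      · simp only [hp, if_true, pvAltLoop_some]
      · rw [Bool.not_eq_true] at hp
        simp only [hp, Bool.false_eq_true, if_false, ih]

-- ===== VERDICT =====

theorem validate_domain_py_spec : Claim_equal_validate_domain_py := by
  intro domain valid_domains _
  unfold Spec_validate_domain_py validate_domain_py validate_domain_py_alt
  by_cases h : domain = ""
  · simp [h]
  · simp only [h, if_false, pvAltLoop_none]
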